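-- pv_equiv track=rewrite | github.com/Leonenkk/AOIS | lab3/views/translate.py | absorb_clauses
-- ===== SOURCE A (Python) =====
-- def literal_set_from_binary(bstr, vars_, is_dnf):
--     lits = []
--     for ch, v in zip(bstr, vars_):
--         if ch == '-':
--             continue
--         if is_dnf:
--             lits.append(v if ch == '1' else "¬" + v)
--         else:
--             lits.append("¬" + v if ch == '1' else v)
--     return set(lits)
--
-- def absorb_clauses(implicants, vars_, is_dnf):
--     literal_sets = [(imp, literal_set_from_binary(imp, vars_, is_dnf)) for imp in implicants]
--     result = []
--     for i, (imp_i, set_i) in enumerate(literal_sets):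
--         redundant = False
--         for j, (imp_j, set_j) in enumerate(literal_sets):
--             if i != j and set_j <= set_i:
--                 redundant = True
--                 break
--         if not redundant:
--             result.append(imp_i)
--     return result
-- ===== SOURCE B (Python) =====
-- def absorb_clauses(implicants, vars_, is_dnf):
--     # canonical key: sorted tuple of the clause's literals
--     def key(imp):
--         lits = set()
--         for ch, v in zip(imp, vars_):
--             if ch != '-':
--                 lits.add(v if (ch == '1') == is_dnf else "¬" + v)
--         return tuple(sorted(lits))
--     keys = [key(imp) for imp in implicants]
--     counts = {}
--     for k in keys:
--         counts[k] = counts.get(k, 0) + 1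
--     distinct = list(counts)
--     out = []
--     for imp, k in zip(implicants, keys):
--         if counts[k] == 1 and not any(k2 != k and all(x in k for x in k2) for k2 in distinct):
--             out.append(imp)
--     return out
-- ===== Notes on version B (the rewrite author's own statement) =====
-- stated objective: alternative
-- what changed: A compares every pair of clauses with Python set-subset tests; B canonicalises each clause to a sorted literal tuple, counts duplicates with one dictionary pass, and runs the subset scan only over the distinct keys, so duplicate clauses are handled by the counter instead of pairwise comparisons.
import Mathlib
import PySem

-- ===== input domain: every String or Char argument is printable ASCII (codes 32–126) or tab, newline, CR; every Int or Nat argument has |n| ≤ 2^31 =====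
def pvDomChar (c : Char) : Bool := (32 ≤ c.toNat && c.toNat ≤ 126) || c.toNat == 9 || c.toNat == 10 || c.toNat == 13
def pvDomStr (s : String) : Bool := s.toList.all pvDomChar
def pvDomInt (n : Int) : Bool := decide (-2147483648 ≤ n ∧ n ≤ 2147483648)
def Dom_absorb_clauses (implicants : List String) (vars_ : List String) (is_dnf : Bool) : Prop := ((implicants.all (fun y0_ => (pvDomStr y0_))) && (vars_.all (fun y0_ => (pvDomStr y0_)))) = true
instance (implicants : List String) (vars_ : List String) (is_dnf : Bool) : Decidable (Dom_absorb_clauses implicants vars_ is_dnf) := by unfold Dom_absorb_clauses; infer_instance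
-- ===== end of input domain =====

-- B replaces A's all-pairs subset scan by canonical sorted-literal keys: a counter handles
-- duplicate clauses in one pass and the subset scan runs over distinct keys only (objective: alternative).

-- ===== PORT A =====
def literal_set_from_binary (bstr : String) (vars_ : List String) (is_dnf : Bool) : PySem.Set String :=
  PySem.Set.ofList
    ((bstr.toList.zip vars_).foldl (fun lits cv =>
      if cv.1 == '-' then lits
      else if is_dnf then lits ++ [if cv.1 == '1' then cv.2 else "¬" ++ cv.2]
      else lits ++ [if cv.1 == '1' then "¬" ++ cv.2 else cv.2]) [])

def absorb_clauses (implicants : List String) (vars_ : List String) (is_dnf : Bool) : List String :=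
  let literal_sets := implicants.map (fun imp => (imp, literal_set_from_binary imp vars_ is_dnf))
  -- inner 'for … break' loop: once redundant is true it stays true, so the fold computes the loop's final value
  (PySem.List.enumerate literal_sets).foldl (fun result ip =>
    let redundant := (PySem.List.enumerate literal_sets).foldl (fun red jp =>
      if decide (ip.1 ≠ jp.1) && PySem.Set.issubset jp.2.2 ip.2.2 then true else red) false
    if !redundant then result ++ [ip.2.1] else result) []

-- ===== PORT B =====
def pvKey (vars_ : List String) (is_dnf : Bool) (imp : String) : List String :=
  PySem.List.sorted
    ((imp.toList.zip vars_).foldl (fun lits cv =>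
      if cv.1 != '-' then
        PySem.Set.add lits (if (cv.1 == '1') == is_dnf then cv.2 else "¬" ++ cv.2)
      else lits) PySem.Set.empty)
    (fun x => x) false

def absorb_clauses_alt (implicants : List String) (vars_ : List String) (is_dnf : Bool) : List String :=
  let keys := implicants.map (pvKey vars_ is_dnf)
  let counts : PySem.Dict (List String) Int :=
    keys.foldl (fun d k => d.insert k (d.getD k 0 + 1)) PySem.Dict.empty
  let distinct := counts.keys
  -- counts[p.2] is a plain lookup in Source B; p.2 is always a key of counts, so getD … 0 is exact
  (implicants.zip keys).foldl (fun out p =>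
    if counts.getD p.2 0 == 1 &&
       !(distinct.any (fun k2 => decide (k2 ≠ p.2) && k2.all (fun x => decide (x ∈ p.2))))
    then out ++ [p.1] else out) []

-- ===== PRECONDITION & SPEC =====
def Spec_absorb_clauses (implicants : List String) (vars_ : List String) (is_dnf : Bool) (out : List String) : Prop := out = absorb_clauses_alt implicants vars_ is_dnf
instance (implicants : List String) (vars_ : List String) (is_dnf : Bool) (out : List String) : Decidable (Spec_absorb_clauses implicants vars_ is_dnf out) := by unfold Spec_absorb_clauses; infer_instance

-- ===== CLAIM (what is proved, stated in full; the proofs are below) =====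
def Claim_equal_absorb_clauses : Prop := ∀ (implicants : List String) (vars_ : List String) (is_dnf : Bool), Dom_absorb_clauses implicants vars_ is_dnf → Spec_absorb_clauses implicants vars_ is_dnf (absorb_clauses implicants vars_ is_dnf)

-- ===== LEMMAS AND PROOFS =====

-- the list of literals a clause contributes (common to both ports)
def pvLitList (vars_ : List String) (is_dnf : Bool) (imp : String) : List String :=
  ((imp.toList.zip vars_).filter (fun cv => cv.1 != '-')).map
    (fun cv => if (cv.1 == '1') == is_dnf then cv.2 else "¬" ++ cv.2)

def pvS (vars_ : List String) (is_dnf : Bool) (imp : String) : PySem.Set String :=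
  PySem.Set.ofList (pvLitList vars_ is_dnf imp)

theorem pvA_set (bstr : String) (vars_ : List String) (is_dnf : Bool) :
    literal_set_from_binary bstr vars_ is_dnf = pvS vars_ is_dnf bstr := by
  unfold literal_set_from_binary pvS pvLitList
  have hf : (fun (lits : List String) (cv : Char × String) =>
      if cv.1 == '-' then lits
      else if is_dnf then lits ++ [if cv.1 == '1' then cv.2 else "¬" ++ cv.2]
      else lits ++ [if cv.1 == '1' then "¬" ++ cv.2 else cv.2])
      = (fun lits cv => if cv.1 != '-' then lits ++ [if (cv.1 == '1') == is_dnf then cv.2 else "¬" ++ cv.2] else lits) := by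
    funext lits cv
    by_cases h : cv.1 = '-' <;> cases is_dnf <;> by_cases h1 : cv.1 = '1' <;> simp [h, h1]
  rw [hf, PySem.List.foldl_append_if]
  simp

theorem pvB_set (vars_ : List String) (is_dnf : Bool) (imp : String) :
    ((imp.toList.zip vars_).foldl (fun lits cv =>
      if cv.1 != '-' then
        PySem.Set.add lits (if (cv.1 == '1') == is_dnf then cv.2 else "¬" ++ cv.2)
      else lits) PySem.Set.empty)
    = pvS vars_ is_dnf imp := by
  unfold pvS pvLitList
  rw [show (fun (lits : PySem.Set String) (cv : Char × String) =>
      if cv.1 != '-' then PySem.Set.add lits (if (cv.1 == '1') == is_dnf then cv.2 else "¬" ++ cv.2) else lits)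
    = (fun lits cv => if cv.1 != '-' then (fun (s : PySem.Set String) (cv : Char × String) => PySem.Set.add s (if (cv.1 == '1') == is_dnf then cv.2 else "¬" ++ cv.2)) lits cv else lits) from rfl,
  PySem.List.foldl_if_eq_foldl_filter]
  rw [← PySem.Set.update_map_eq_foldl_add]
  rw [show (PySem.Set.empty : PySem.Set String) = [] from rfl, PySem.Set.update_nil_left]

theorem pvKey_eq (vars_ : List String) (is_dnf : Bool) (imp : String) :
    pvKey vars_ is_dnf imp = PySem.List.sorted (pvS vars_ is_dnf imp) (fun x => x) false := by
  unfold pvKey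
  rw [pvB_set]

theorem mem_pvKey (vars_ : List String) (is_dnf : Bool) (imp : String) (x : String) :
    x ∈ pvKey vars_ is_dnf imp ↔ x ∈ pvS vars_ is_dnf imp := by
  rw [pvKey_eq]; exact PySem.List.mem_sorted _ _ _ _

theorem pvKey_eq_iff (vars_ : List String) (is_dnf : Bool) (a b : String) :
    pvKey vars_ is_dnf a = pvKey vars_ is_dnf b ↔
      (∀ x, x ∈ pvS vars_ is_dnf a ↔ x ∈ pvS vars_ is_dnf b) := by
  rw [pvKey_eq, pvKey_eq, PySem.List.sorted_id_eq_sorted_id_iff_perm]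
  exact List.perm_ext_iff_of_nodup (PySem.Set.nodup_ofList _) (PySem.Set.nodup_ofList _)

-- two-or-more occurrences at a known index ↔ another index with the same value
theorem pvCount_two_iff {α : Type} [BEq α] [LawfulBEq α] (l : List α) (i : Nat) (hi : i < l.length) :
    2 ≤ l.count l[i] ↔ ∃ j, ∃ hj : j < l.length, j ≠ i ∧ l[j] = l[i] := by
  obtain ⟨a, ha⟩ : ∃ a, l[i] = a := ⟨_, rfl⟩
  rw [ha]
  have hsplit : l.take i ++ l[i] :: l.drop (i+1) = l := by
    rw [List.getElem_cons_drop, List.take_append_drop]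
  have hc : List.count a l = List.count a (l.take i) + (List.count a (l.drop (i+1)) + 1) := by
    conv_lhs => rw [← hsplit]
    rw [List.count_append, List.count_cons, ha]
    simp
  constructor
  · intro h2
    rw [hc] at h2
    have : 0 < List.count a (l.take i) ∨ 0 < List.count a (l.drop (i+1)) := by omega
    rcases this with h | h
    · rcases List.mem_take_iff_getElem.1 (List.count_pos_iff.1 h) with ⟨j, hm, hj⟩
      exact ⟨j, by omega, by omega, hj⟩
    · rcases List.mem_drop_iff_getElem.1 (List.count_pos_iff.1 h) with ⟨j, hm, hj⟩
      exact ⟨i + 1 + j, by omega, by omega, hj⟩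
  · rintro ⟨j, hj, hne, heq⟩
    rw [hc]
    have hmem : a ∈ l.take i ∨ a ∈ l.drop (i+1) := by
      rcases Nat.lt_or_ge j i with h | h
      · left; exact List.mem_take_iff_getElem.2 ⟨j, by omega, heq⟩
      · right
        exact List.mem_drop_iff_getElem.2 ⟨j - (i+1), by omega, by
          simp only [show i + 1 + (j - (i+1)) = j from by omega]; exact heq⟩
    rcases hmem with h | h
    · have := List.count_pos_iff.2 h; omega
    · have := List.count_pos_iff.2 h; omega

theorem pvEnum_filter_map {β : Type} (l : List β) (p : Int × β → Bool) (q : β → Bool) (s : Int)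
    (h : ∀ (i : Nat) (hi : i < l.length), p (s + i, l[i]) = q l[i]) :
    ((PySem.List.enumerate l s).filter p).map (·.2) = l.filter q := by
  induction l generalizing s with
  | nil => simp [PySem.List.enumerate_nil]
  | cons x t ih =>
    rw [PySem.List.enumerate_cons]
    have hx : p (s, x) = q x := by
      have := h 0 (by simp)
      simpa using this
    have ht := ih (s + 1) (fun i hi => by
      have := h (i+1) (by simpa using Nat.succ_lt_succ hi)
      simpa [add_assoc, add_comm, add_left_comm] using this)
    by_cases hq : q x
    · simp [hx, hq, ht]
    · simp [hx, hq, ht]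

-- B's per-clause keep test, named for the proofs
def pvCounts (keys : List (List String)) : PySem.Dict (List String) Int :=
  keys.foldl (fun dd k => dd.insert k (dd.getD k 0 + 1)) PySem.Dict.empty

def pvQ (vars_ : List String) (is_dnf : Bool) (implicants : List String) (x : String) : Bool :=
  (pvCounts (implicants.map (pvKey vars_ is_dnf))).getD (pvKey vars_ is_dnf x) 0 == 1 &&
  !((pvCounts (implicants.map (pvKey vars_ is_dnf))).keys.any
      (fun k2 => decide (k2 ≠ pvKey vars_ is_dnf x) && k2.all (fun y => decide (y ∈ pvKey vars_ is_dnf x))))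

theorem pvCrux (implicants vars_ : List String) (is_dnf : Bool) (i : Nat) (hi : i < implicants.length) :
    (!((PySem.List.enumerate (implicants.map (fun imp => (imp, pvS vars_ is_dnf imp))) 0).any
        (fun jp => decide (((0:Int) + (i:Nat)) ≠ jp.1) && PySem.Set.issubset jp.2.2 (pvS vars_ is_dnf implicants[i]))))
      = pvQ vars_ is_dnf implicants implicants[i] := by
  have hA : ((PySem.List.enumerate (implicants.map (fun imp => (imp, pvS vars_ is_dnf imp))) 0).any
        (fun jp => decide (((0:Int) + (i:Nat)) ≠ jp.1) && PySem.Set.issubset jp.2.2 (pvS vars_ is_dnf implicants[i])) = true)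
      ↔ ∃ j, ∃ hj : j < implicants.length, j ≠ i ∧
          ∀ x ∈ pvS vars_ is_dnf (implicants[j]'hj), x ∈ pvS vars_ is_dnf implicants[i] := by
    rw [List.any_eq_true]
    constructor
    · rintro ⟨jp, hmem, hcond⟩
      rcases (PySem.List.mem_enumerate_iff _ _ _).1 hmem with ⟨k, hk, rfl⟩
      simp only [List.getElem_map] at hcond
      rw [Bool.and_eq_true, decide_eq_true_iff] at hcond
      obtain ⟨hne, hsub⟩ := hcond
      refine ⟨k, by simpa using hk, ?_, (PySem.Set.issubset_iff _ _).1 hsub⟩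
      intro h; exact hne (by simp [h])
    · rintro ⟨j, hj, hne, hsub⟩
      have hj' : j < (implicants.map (fun imp => (imp, pvS vars_ is_dnf imp))).length := by simpa using hj
      refine ⟨((0:Int) + (j:Nat), (implicants.map (fun imp => (imp, pvS vars_ is_dnf imp)))[j]'hj'), ?_, ?_⟩
      · exact (PySem.List.mem_enumerate_iff _ _ _).2 ⟨j, hj', rfl⟩
      · simp only [List.getElem_map]
        rw [Bool.and_eq_true, decide_eq_true_iff]
        constructor
        · intro h
          have : (i : Int) = (j : Nat) := by omega
          exact hne (by exact_mod_cast this.symm)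
        · exact (PySem.Set.issubset_iff _ _).2 hsub
  have hB : (pvQ vars_ is_dnf implicants implicants[i] = true)
      ↔ ((implicants.map (pvKey vars_ is_dnf)).count (pvKey vars_ is_dnf implicants[i]) = 1 ∧
          ¬∃ k2, k2 ∈ implicants.map (pvKey vars_ is_dnf) ∧ k2 ≠ pvKey vars_ is_dnf implicants[i] ∧
            ∀ y ∈ k2, y ∈ pvKey vars_ is_dnf implicants[i]) := by
    unfold pvQ pvCounts
    rw [Bool.and_eq_true, beq_iff_eq,
        PySem.Dict.getD_foldl_insert_add_one, PySem.Dict.keys_foldl_insert,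
        PySem.Dict.keys_empty, PySem.Set.update_nil_left]
    constructor
    · rintro ⟨hcnt, hany⟩
      refine ⟨by simpa using hcnt, ?_⟩
      rintro ⟨k2, hmem, hne, hsub⟩
      rw [Bool.not_eq_true', ← Bool.not_eq_true, List.any_eq_true] at hany
      exact hany ⟨k2, (PySem.Set.mem_ofList _ _).2 hmem, by
        rw [Bool.and_eq_true, decide_eq_true_iff, List.all_eq_true]
        exact ⟨hne, fun y hy => decide_eq_true_iff.2 (hsub y hy)⟩⟩
    · rintro ⟨hcnt, hnex⟩
      refine ⟨by simp [hcnt], ?_⟩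
      rw [Bool.not_eq_true', ← Bool.not_eq_true, List.any_eq_true]
      rintro ⟨k2, hmem, hcond⟩
      rw [Bool.and_eq_true, decide_eq_true_iff, List.all_eq_true] at hcond
      exact hnex ⟨k2, (PySem.Set.mem_ofList _ _).1 hmem, hcond.1,
        fun y hy => decide_eq_true_iff.1 (hcond.2 y hy)⟩
  have hcnt1 : 1 ≤ (implicants.map (pvKey vars_ is_dnf)).count (pvKey vars_ is_dnf implicants[i]) := by
    apply List.count_pos_iff.2
    exact List.mem_map.2 ⟨implicants[i], List.getElem_mem hi, rfl⟩
  have hkeysi : (implicants.map (pvKey vars_ is_dnf))[i]'(by simpa using hi) = pvKey vars_ is_dnf implicants[i] := by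
    simp
  have hdup := pvCount_two_iff (implicants.map (pvKey vars_ is_dnf)) i (by simpa using hi)
  rw [hkeysi] at hdup
  have hiff : (¬∃ j, ∃ hj : j < implicants.length, j ≠ i ∧
        ∀ x ∈ pvS vars_ is_dnf (implicants[j]'hj), x ∈ pvS vars_ is_dnf implicants[i])
      ↔ ((implicants.map (pvKey vars_ is_dnf)).count (pvKey vars_ is_dnf implicants[i]) = 1 ∧
          ¬∃ k2, k2 ∈ implicants.map (pvKey vars_ is_dnf) ∧ k2 ≠ pvKey vars_ is_dnf implicants[i] ∧
            ∀ y ∈ k2, y ∈ pvKey vars_ is_dnf implicants[i]) := by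
    constructor
    · intro hnA
      constructor
      · by_contra hc
        have h2 : 2 ≤ (implicants.map (pvKey vars_ is_dnf)).count (pvKey vars_ is_dnf implicants[i]) := by omega
        rcases hdup.1 h2 with ⟨j, hj, hne, heq⟩
        have hj' : j < implicants.length := by simpa using hj
        simp only [List.getElem_map] at heq
        have hmemeq := (pvKey_eq_iff vars_ is_dnf (implicants[j]'hj') implicants[i]).1 heq
        exact hnA ⟨j, hj', hne, fun x hx => (hmemeq x).1 hx⟩
      · rintro ⟨k2, hmem, hne, hsub⟩
        rcases List.mem_map.1 hmem with ⟨y, hy, rfl⟩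
        rcases List.mem_iff_getElem.1 hy with ⟨j, hj, rfl⟩
        have hne' : j ≠ i := by
          intro h; subst h; exact hne rfl
        refine hnA ⟨j, hj, hne', fun x hx => ?_⟩
        have hx' : x ∈ pvKey vars_ is_dnf (implicants[j]'hj) := (mem_pvKey _ _ _ _).2 hx
        exact (mem_pvKey _ _ _ _).1 (hsub x hx')
    · rintro ⟨hcnt, hnex⟩ ⟨j, hj, hne, hsub⟩
      by_cases hk : pvKey vars_ is_dnf (implicants[j]'hj) = pvKey vars_ is_dnf implicants[i]
      · have h2 : 2 ≤ (implicants.map (pvKey vars_ is_dnf)).count (pvKey vars_ is_dnf implicants[i]) :=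
          hdup.2 ⟨j, by simpa using hj, hne, by simp [hk]⟩
        omega
      · exact hnex ⟨pvKey vars_ is_dnf (implicants[j]'hj),
          List.mem_map.2 ⟨implicants[j]'hj, List.getElem_mem hj, rfl⟩, hk,
          fun y hy => (mem_pvKey _ _ _ _).2 ((hsub y ((mem_pvKey _ _ _ _).1 hy)))⟩
  cases hq : pvQ vars_ is_dnf implicants implicants[i] with
  | true =>
    have hB' := hB.1 hq
    have : ¬((PySem.List.enumerate (implicants.map (fun imp => (imp, pvS vars_ is_dnf imp))) 0).any
        (fun jp => decide (((0:Int) + (i:Nat)) ≠ jp.1) && PySem.Set.issubset jp.2.2 (pvS vars_ is_dnf implicants[i])) = true) := by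
      rw [hA]; exact hiff.2 hB'
    simp at this ⊢
    exact this
  | false =>
    have hnB : ¬(pvQ vars_ is_dnf implicants implicants[i] = true) := by simp [hq]
    rw [hB] at hnB
    have hAx : ∃ j, ∃ hj : j < implicants.length, j ≠ i ∧
        ∀ x ∈ pvS vars_ is_dnf (implicants[j]'hj), x ∈ pvS vars_ is_dnf implicants[i] := by
      by_contra hc
      exact hnB (hiff.1 hc)
    rw [show ((PySem.List.enumerate (implicants.map (fun imp => (imp, pvS vars_ is_dnf imp))) 0).any
        (fun jp => decide (((0:Int) + (i:Nat)) ≠ jp.1) && PySem.Set.issubset jp.2.2 (pvS vars_ is_dnf implicants[i]))) = true from hA.2 hAx]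
    rfl

theorem pvA_norm (implicants vars_ : List String) (is_dnf : Bool) :
    absorb_clauses implicants vars_ is_dnf
      = ((PySem.List.enumerate (implicants.map (fun imp => (imp, pvS vars_ is_dnf imp))) 0).filter
          (fun ip => !((PySem.List.enumerate (implicants.map (fun imp => (imp, pvS vars_ is_dnf imp))) 0).any
              (fun jp => decide (ip.1 ≠ jp.1) && PySem.Set.issubset jp.2.2 ip.2.2)))).map
        (fun ip => ip.2.1) := by
  unfold absorb_clauses
  simp only [pvA_set]
  rw [show (fun (result : List String) (ip : Int × String × PySem.Set String) =>
        let redundant := (PySem.List.enumerate (implicants.map (fun imp => (imp, pvS vars_ is_dnf imp))) 0).foldl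
          (fun red jp => if decide (ip.1 ≠ jp.1) && PySem.Set.issubset jp.2.2 ip.2.2 then true else red) false
        if !redundant then result ++ [ip.2.1] else result)
      = (fun result ip =>
          if (!((PySem.List.enumerate (implicants.map (fun imp => (imp, pvS vars_ is_dnf imp))) 0).any
              (fun jp => decide (ip.1 ≠ jp.1) && PySem.Set.issubset jp.2.2 ip.2.2)))
          then result ++ [(fun (ip : Int × String × PySem.Set String) => ip.2.1) ip] else result) from by
        funext result ip
        rw [PySem.List.foldl_if_true_eq]
        simp only [Bool.false_or]]
  rw [PySem.List.foldl_append_if]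
  simp

theorem pvB_norm (implicants vars_ : List String) (is_dnf : Bool) :
    absorb_clauses_alt implicants vars_ is_dnf
      = implicants.filter (pvQ vars_ is_dnf implicants) := by
  unfold absorb_clauses_alt
  show (List.foldl
      (fun out p =>
        if ((List.foldl (fun (dd : PySem.Dict (List String) Int) k => dd.insert k (dd.getD k 0 + 1)) PySem.Dict.empty
                (List.map (pvKey vars_ is_dnf) implicants)).getD p.2 0 == 1 &&
            !((List.foldl (fun (dd : PySem.Dict (List String) Int) k => dd.insert k (dd.getD k 0 + 1)) PySem.Dict.empty
                (List.map (pvKey vars_ is_dnf) implicants)).keys.any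
                (fun k2 => decide (k2 ≠ p.2) && k2.all fun x => decide (x ∈ p.2))))
        then out ++ [p.1] else out)
      [] (implicants.zip (List.map (pvKey vars_ is_dnf) implicants)))
    = List.filter (pvQ vars_ is_dnf implicants) implicants
  rw [show (implicants.zip (implicants.map (pvKey vars_ is_dnf)))
        = implicants.map (fun x => (x, pvKey vars_ is_dnf x)) from by
      have h : (List.map id implicants).zip (List.map (pvKey vars_ is_dnf) implicants)
          = List.map (fun x => (id x, pvKey vars_ is_dnf x)) implicants := List.zip_map'
      rw [List.map_id] at h
      simpa using h]
  rw [PySem.List.foldl_append_if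
    (p := fun (p : String × List String) =>
      ((implicants.map (pvKey vars_ is_dnf)).foldl (fun (dd : PySem.Dict (List String) Int) k => dd.insert k (dd.getD k 0 + 1)) PySem.Dict.empty).getD p.2 0 == 1 &&
       !(((implicants.map (pvKey vars_ is_dnf)).foldl (fun (dd : PySem.Dict (List String) Int) k => dd.insert k (dd.getD k 0 + 1)) PySem.Dict.empty).keys.any
          (fun k2 => decide (k2 ≠ p.2) && k2.all (fun x => decide (x ∈ p.2)))))
    (f := fun (p : String × List String) => p.1)]
  rw [List.filter_map, List.map_map]
  rw [show ((fun (p : String × List String) => p.1) ∘ fun x => (x, pvKey vars_ is_dnf x)) = id from rfl,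
      List.map_id]
  exact List.filter_congr (fun x _ => rfl)

theorem absorb_clauses_spec' (implicants vars_ : List String) (is_dnf : Bool) :
    absorb_clauses implicants vars_ is_dnf = absorb_clauses_alt implicants vars_ is_dnf := by
  rw [pvA_norm, pvB_norm]
  rw [show (fun (ip : Int × String × PySem.Set String) => ip.2.1)
        = (fun (b : String × PySem.Set String) => b.1) ∘ (fun (ip : Int × String × PySem.Set String) => ip.2) from rfl,
      ← List.map_map]
  rw [pvEnum_filter_map _ _ (fun b => pvQ vars_ is_dnf implicants b.1) 0
      (fun i hi => by
        simp only [List.getElem_map]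
        exact pvCrux implicants vars_ is_dnf i (by simpa using hi))]
  rw [List.filter_map, List.map_map]
  rw [show ((fun (b : String × PySem.Set String) => b.1) ∘ fun imp => (imp, pvS vars_ is_dnf imp)) = id from rfl,
      List.map_id]
  exact List.filter_congr (fun x _ => rfl)

-- ===== VERDICT (by name: the statement is the Claim_ definition above) =====
theorem absorb_clauses_spec : Claim_equal_absorb_clauses := by
  intro implicants vars_ is_dnf _
  unfold Spec_absorb_clauses
  exact absorb_clauses_spec' implicants vars_ is_dnf
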